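-- pv_equiv track=rewrite | github.com/NickoShmFree/ReadingList | src/schemas/user.py | _is_too_repetitive
-- ===== SOURCE A (Python) =====
-- def _is_too_repetitive(password: str) -> bool:
--     """Проверяет, состоит ли пароль из повторяющихся символов."""
--     if len(password) < 3:
--         return False
--
--     # Все символы одинаковые
--     if len(set(password)) == 1:
--         return True
--
--     # Проверка повторяющихся пар (aabbcc, 112233)
--     for i in range(len(password) - 2):
--         if password[i] == password[i + 1] == password[i + 2]:
--             return True
--
--     return False
-- ===== SOURCE B (Python) =====
-- def _is_too_repetitive(password: str) -> bool:
--     """Run-length scan: True iff some run of equal consecutive characters reaches 3."""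
--     run = 0
--     prev = None
--     for ch in password:
--         if ch == prev:
--             run += 1
--         else:
--             prev = ch
--             run = 1
--         if run >= 3:
--             return True
--     return False
-- ===== Notes on version B (the rewrite author's own statement) =====
-- stated objective: simpler
-- what changed: Replaced the length guard, the set-uniqueness check and the index-based triple loop with a single run-length scan over the characters that reports a run of length 3; both the len<3 guard and the set check are subsumed by the run scan.
import Mathlib
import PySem

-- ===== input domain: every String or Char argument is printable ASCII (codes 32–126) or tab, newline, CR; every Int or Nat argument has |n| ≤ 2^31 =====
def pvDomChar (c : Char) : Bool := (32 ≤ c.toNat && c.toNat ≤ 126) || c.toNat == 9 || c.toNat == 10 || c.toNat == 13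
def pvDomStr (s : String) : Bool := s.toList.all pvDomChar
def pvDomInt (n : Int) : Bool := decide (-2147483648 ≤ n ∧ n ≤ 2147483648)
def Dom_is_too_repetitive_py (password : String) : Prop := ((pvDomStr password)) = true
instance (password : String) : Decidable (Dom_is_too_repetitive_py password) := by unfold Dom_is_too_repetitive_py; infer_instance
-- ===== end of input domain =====

-- B replaces A's length guard, set-uniqueness check and index loop by a single run-length scan (simpler; same return value).


-- ===== PORT A =====
-- A: len<3 guard, then len(set(password))==1 check, then a for-loop over i in range(len-2)
-- testing password[i] == password[i+1] == password[i+2] (ported as .any = early return on True).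
def is_too_repetitive_py (password : String) : Bool :=
  let cs := password.toList
  if cs.length < 3 then false
  else if (PySem.Set.ofList cs).length == 1 then true
  else
    (PySem.List.pyRange 0 ((cs.length : Int) - 2) 1).any fun i =>
      (PySem.List.pyGet? cs i == PySem.List.pyGet? cs (i + 1)) &&
      (PySem.List.pyGet? cs (i + 1) == PySem.List.pyGet? cs (i + 2))

-- ===== PORT B =====
-- B: run-length scan; state (prev, run) as in Source B, return True as soon as run reaches 3.
def altGo : List Char → Option Char → Nat → Bool
  | [], _, _ => false
  | c :: rest, prev, run =>
    let st := if (some c : Option Char) = prev then (prev, run + 1) else (some c, 1)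
    if st.2 ≥ 3 then true else altGo rest st.1 st.2

def is_too_repetitive_py_alt (password : String) : Bool :=
  altGo password.toList none 0

-- ===== PRECONDITION & SPEC =====
def Spec_is_too_repetitive_py (password : String) (out : Bool) : Prop := out = is_too_repetitive_py_alt password
instance (password : String) (out : Bool) : Decidable (Spec_is_too_repetitive_py password out) := by unfold Spec_is_too_repetitive_py; infer_instance

-- ===== CLAIM (what is proved, stated in full; the proofs are below) =====
def Claim_equal_is_too_repetitive_py : Prop := ∀ (password : String), Dom_is_too_repetitive_py password → Spec_is_too_repetitive_py password (is_too_repetitive_py password)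

-- ===== LEMMAS AND PROOFS =====

-- canonical form: "some three consecutive characters are equal"
def hasTriple : List Char → Bool
  | a :: b :: c :: rest => (a == b && b == c) || hasTriple (b :: c :: rest)
  | _ => false

lemma hasTriple_cons_ne (p c : Char) (l : List Char) (h : p ≠ c) :
    hasTriple (p :: c :: l) = hasTriple (c :: l) := by
  cases l with
  | nil => simp [hasTriple]
  | cons r rs => simp [hasTriple, h]

-- B's scan with a pending run of `run` copies of `p` equals hasTriple of the run prepended.
lemma altGo_some (l : List Char) : ∀ (p : Char) (run : Nat), 1 ≤ run → run ≤ 2 →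
    altGo l (some p) run = hasTriple (List.replicate run p ++ l) := by
  induction l with
  | nil =>
    intro p run h1 h2
    interval_cases run <;> simp [altGo, hasTriple, List.replicate]
  | cons c rest ih =>
    intro p run h1 h2
    by_cases hc : c = p
    · subst hc
      interval_cases run
      · -- run = 1: recurse with run = 2
        rw [show altGo (c :: rest) (some c) 1 = altGo rest (some c) 2 by simp [altGo]]
      -- goal for run = 1 continues below; run = 2 returns true
        rw [ih c 2 (by omega) (by omega)]
        simp [List.replicate]
      · simp [altGo, List.replicate, hasTriple]
    · have h' : ((some c : Option Char) = some p) = False := by simp [hc]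
      rw [show altGo (c :: rest) (some p) run = altGo rest (some c) 1 by simp [altGo, h']]
      rw [ih c 1 (by omega) (by omega)]
      interval_cases run
      · simpa [List.replicate] using (hasTriple_cons_ne p c rest (fun h => hc h.symm)).symm
      · simp only [List.replicate, List.cons_append, List.nil_append]
        rw [show hasTriple (p :: p :: c :: rest)
              = ((p == p && p == c) || hasTriple (p :: c :: rest)) from rfl]
        rw [hasTriple_cons_ne p c rest (fun h => hc h.symm)]
        have hpc : (p == c) = false := by
          simp only [beq_eq_false_iff_ne, ne_eq]
          exact fun h => hc h.symm
        simp [hpc]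

lemma alt_eq_hasTriple (cs : List Char) : altGo cs none 0 = hasTriple cs := by
  cases cs with
  | nil => simp [altGo, hasTriple]
  | cons c rest =>
    rw [show altGo (c :: rest) none 0 = altGo rest (some c) 1 by simp [altGo]]
    rw [altGo_some rest c 1 (by omega) (by omega)]
    simp [List.replicate]

-- A's loop over Nat indices equals hasTriple.
lemma range_any_eq_hasTriple (cs : List Char) :
    (List.range (cs.length - 2)).any
      (fun k => ((cs[k]? == cs[k+1]?) && (cs[k+1]? == cs[k+2]?))) = hasTriple cs := by
  induction cs with
  | nil => simp [hasTriple]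
  | cons a tail ih =>
    cases tail with
    | nil => simp [hasTriple]
    | cons b rest =>
      cases rest with
      | nil => simp [hasTriple]
      | cons c rs =>
        have hlen : (a :: b :: c :: rs).length - 2 = rs.length + 1 := by simp
        have ih' : (List.range rs.length).any
            (fun k => (((b :: c :: rs)[k]? == (b :: c :: rs)[k+1]?) &&
              ((b :: c :: rs)[k+1]? == (b :: c :: rs)[k+2]?))) = hasTriple (b :: c :: rs) := by
          have h2 : (b :: c :: rs).length - 2 = rs.length := by simp
          rw [← h2]; exact ih
        rw [hlen, List.range_succ_eq_map]
        simp only [List.any_cons, List.any_map]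
        have hshift : (List.range rs.length).any
            ((fun k => (((a :: b :: c :: rs)[k]? == (a :: b :: c :: rs)[k+1]?) &&
              ((a :: b :: c :: rs)[k+1]? == (a :: b :: c :: rs)[k+2]?))) ∘ Nat.succ)
            = (List.range rs.length).any
              (fun k => (((b :: c :: rs)[k]? == (b :: c :: rs)[k+1]?) &&
                ((b :: c :: rs)[k+1]? == (b :: c :: rs)[k+2]?))) := by
          apply PySem.List.any_congr_mem
          intro k _
          simp [Function.comp, Nat.succ_eq_add_one]
        rw [hshift, ih']
        simp [hasTriple]

-- all characters equal (set of size 1) and length ≥ 3 force a triple at the front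
lemma hasTriple_of_allsame (cs : List Char) (h3 : ¬ cs.length < 3)
    (hset : (PySem.Set.ofList cs).length = 1) : hasTriple cs = true := by
  obtain ⟨x, hx⟩ : ∃ x, PySem.Set.ofList cs = [x] := by
    match hEq : PySem.Set.ofList cs with
    | [] => rw [hEq] at hset; simp at hset
    | [x] => exact ⟨x, rfl⟩
    | x :: y :: zs => rw [hEq] at hset; simp at hset
  have hall : ∀ y ∈ cs, y = x := by
    intro y hy
    have : y ∈ PySem.Set.ofList cs := (PySem.Set.mem_ofList cs y).mpr hy
    rw [hx] at this; simpa using this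
  match cs, h3 with
  | [], h => exact absurd (by norm_num) h
  | [x], h => exact absurd (by norm_num) h
  | [x, y], h => exact absurd (by norm_num) h
  | a :: b :: c :: rest, _ =>
    have ha := hall a (by simp)
    have hb := hall b (by simp)
    have hc := hall c (by simp)
    subst ha hb hc
    simp [hasTriple]

-- ===== VERDICT (by name: the statement is the Claim_ definition above) =====
theorem is_too_repetitive_py_spec : Claim_equal_is_too_repetitive_py := by
  intro password _
  unfold Spec_is_too_repetitive_py is_too_repetitive_py is_too_repetitive_py_alt
  set cs := password.toList with hcs
  simp only []
  rw [alt_eq_hasTriple]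
  by_cases h3 : cs.length < 3
  · rw [if_pos h3]
    match cs, h3 with
    | [], _ => rfl
    | [a], _ => rfl
    | [a, b], _ => rfl
  · rw [if_neg h3]
    by_cases hset : (PySem.Set.ofList cs).length = 1
    · rw [if_pos (by simpa using hset)]
      exact (hasTriple_of_allsame cs h3 hset).symm
    · rw [if_neg (by simpa using hset)]
      have hcast : ((cs.length : Int) - 2) = ((cs.length - 2 : Nat) : Int) := by
        omega
      rw [hcast, PySem.List.pyRange_zero_natCast, List.any_map]
      rw [← range_any_eq_hasTriple cs]
      apply PySem.List.any_congr_mem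
      intro k _
      have h1 : ((k : Int) + 1) = ((k + 1 : Nat) : Int) := by push_cast; ring
      have h2 : ((k : Int) + 2) = ((k + 2 : Nat) : Int) := by push_cast; ring
      simp only [Function.comp_apply, h1, h2, PySem.List.pyGet?_natCast]
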